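-- pv_equiv track=rewrite | github.com/Shabeebbv/Leetcode_problems | 3774-absolute-difference-between-maximum-and-minimum-k-elements/3774-absolute-difference-between-maximum-and-minimum-k-elements.py | absDifference
-- ===== SOURCE A (Python) =====
-- def absDifference(nums, k):
--     srt=sorted(nums)
--     srt1=sorted(nums,reverse=True)
--     sum1=0
--     sum2=0
--     for i in range(0,k):
--         sum1+=srt[i]
--         sum2+=srt1[i]
--     return abs(sum1-sum2)
-- ===== SOURCE B (Python) =====
-- def _ksum(xs, k):
--     # sum of the k smallest elements of xs (0 <= k <= len(xs)), quickselect-style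
--     if k == 0:
--         return 0
--     if k == len(xs):
--         return sum(xs)
--     p = xs[0]
--     less = [x for x in xs[1:] if x < p]
--     geq = [x for x in xs[1:] if x >= p]
--     if k <= len(less):
--         return _ksum(less, k)
--     return sum(less) + p + _ksum(geq, k - len(less) - 1)
--
--
-- def absDifference(nums, k):
--     small = _ksum(nums, k)
--     large = sum(nums) - _ksum(nums, len(nums) - k)
--     return abs(small - large)
-- ===== Notes on version B (the rewrite author's own statement) =====
-- stated objective: faster
-- what changed: B never sorts: it computes the sum of the k smallest elements by a quickselect-style recursive pivot partition (average O(n)) and gets the k-largest sum as total minus the (n-k)-smallest sum, instead of A's two full sorts plus an index loop.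
-- outside the precondition, e.g. on absDifference([1, 2], -1): A returns 0, B raises IndexError
import Mathlib
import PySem

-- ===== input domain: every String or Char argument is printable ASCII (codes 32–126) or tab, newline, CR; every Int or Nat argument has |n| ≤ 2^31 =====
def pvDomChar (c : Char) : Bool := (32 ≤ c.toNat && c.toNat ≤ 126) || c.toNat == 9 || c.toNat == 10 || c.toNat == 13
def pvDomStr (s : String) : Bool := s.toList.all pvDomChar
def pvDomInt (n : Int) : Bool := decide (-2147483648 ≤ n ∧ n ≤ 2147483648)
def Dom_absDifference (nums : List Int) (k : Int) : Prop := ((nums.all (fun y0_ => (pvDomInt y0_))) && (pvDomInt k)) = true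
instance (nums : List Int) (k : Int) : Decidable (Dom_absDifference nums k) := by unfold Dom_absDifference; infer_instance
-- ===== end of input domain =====

-- B avoids sorting: a quickselect-style recursive pivot partition sums the k smallest
-- elements, and the k-largest sum is total minus the (n-k)-smallest sum.

-- ===== PORT A =====
def absDifference (nums : List Int) (k : Int) : Int :=
  let srt := PySem.List.sorted nums (fun x => x) false
  let srt1 := PySem.List.sorted nums (fun x => x) true
  -- sum1 += srt[i]; sum2 += srt1[i]  (in range under Pre_; pyGetD's default is never read there)
  let p := (PySem.List.pyRange 0 k 1).foldl
      (fun (s : Int × Int) i =>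
        (s.1 + PySem.List.pyGetD srt i 0, s.2 + PySem.List.pyGetD srt1 i 0)) (0, 0)
  |p.1 - p.2|

-- ===== PORT B =====
-- _ksum: sum of the k smallest elements via pivot partition. On [] with k ≠ 0 the Python
-- raises IndexError (xs[0]); that case is unreachable from absDifference_alt under Pre_,
-- the port returns 0 there.
def pvKsum (xs : List Int) (k : Int) : Int :=
  if k = 0 then 0
  else if k = (xs.length : Int) then xs.sum
  else
    match xs with
    | [] => 0
    | p :: rest =>
      let less := rest.filter (fun x => decide (x < p))
      let geq := rest.filter (fun x => decide (p ≤ x))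
      if k ≤ (less.length : Int) then pvKsum less k
      else less.sum + p + pvKsum geq (k - less.length - 1)
termination_by xs.length
decreasing_by
  · simpa using Nat.lt_succ_of_le (le_trans (List.length_filter_le _ rest.attach) (by simp))
  · simpa using Nat.lt_succ_of_le (le_trans (List.length_filter_le _ rest.attach) (by simp))

def absDifference_alt (nums : List Int) (k : Int) : Int :=
  let small := pvKsum nums k
  let large := nums.sum - pvKsum nums ((nums.length : Int) - k)
  |small - large|

-- ===== PRECONDITION & SPEC =====
-- Pre_ excludes k > len(nums) (both A and B raise IndexError) and k < 0 (A's empty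
-- range(0,k) accidentally returns 0 while B's recursion raises IndexError; a negative
-- count of elements is outside the task's natural domain).
def Pre_absDifference (nums : List Int) (k : Int) : Prop := 0 ≤ k ∧ k ≤ nums.length
instance (nums : List Int) (k : Int) : Decidable (Pre_absDifference nums k) := by unfold Pre_absDifference; infer_instance
def pvWitness_absDifference : List Int × Int := ([3, 1, 2, 5], 2)
def Spec_absDifference (nums : List Int) (k : Int) (out : Int) : Prop := out = absDifference_alt nums k
instance (nums : List Int) (k : Int) (out : Int) : Decidable (Spec_absDifference nums k out) := by unfold Spec_absDifference; infer_instance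

-- ===== CLAIM (what is proved, stated in full; the proofs are below) =====
def Claim_equal_absDifference : Prop := ∀ (nums : List Int) (k : Int), Dom_absDifference nums k → Pre_absDifference nums k → Spec_absDifference nums k (absDifference nums k)

-- ===== LEMMAS AND PROOFS =====

-- sorted(nums, reverse=True) is the reverse of sorted(nums) (values are Ints, so stability is invisible)
lemma sorted_rev_eq_reverse (nums : List Int) :
    PySem.List.sorted nums (fun x => x) true = (PySem.List.sorted nums (fun x => x) false).reverse := by
  refine List.Perm.eq_of_pairwise (le := fun a b : Int => b ≤ a)
    (fun a b _ _ h1 h2 => le_antisymm h2 h1)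
    (PySem.List.sorted_pairwise_rev nums (fun x => x))
    (by rw [List.pairwise_reverse]; exact PySem.List.sorted_pairwise nums (fun x => x))
    ((PySem.List.sorted_perm nums (fun x => x) true).trans
      ((PySem.List.sorted_perm nums (fun x => x) false).symm.trans
        (List.reverse_perm _).symm))

-- A's index loop summing xs[0..m) equals the sum of the first m elements
lemma fold_sum (xs : List Int) (m : Nat) (c : Int) (h : m ≤ xs.length) :
    (PySem.List.pyRange 0 (m : Int) 1).foldl (fun acc i => acc + PySem.List.pyGetD xs i 0) c
      = c + (xs.take m).sum := by
  induction m generalizing c with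
  | zero => simp [PySem.List.pyRange_one_eq_nil]
  | succ n ih =>
    have hn : n < xs.length := by omega
    rw [show ((n + 1 : Nat) : Int) = (n : Int) + 1 by push_cast; ring,
        PySem.List.pyRange_one_succ_right (by positivity), List.foldl_append,
        ih c (by omega)]
    simp only [List.foldl_cons, List.foldl_nil]
    rw [PySem.List.pyGetD_natCast, List.getD_eq_getElem _ _ hn,
        List.take_add_one, List.sum_append, List.getElem?_eq_getElem hn]
    simp [add_assoc]

-- partitioning around the pivot splits sorted(p :: rest) into sorted(less), p, sorted(geq)
lemma sorted_cons_partition (p : Int) (rest : List Int) :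
    PySem.List.sorted (p :: rest) (fun x => x) false
      = PySem.List.sorted (rest.filter (fun x => decide (x < p))) (fun x => x) false
        ++ p :: PySem.List.sorted (rest.filter (fun x => decide (p ≤ x))) (fun x => x) false := by
  set less := rest.filter (fun x => decide (x < p)) with hless
  set geq := rest.filter (fun x => decide (p ≤ x)) with hgeq
  have hgeq' : geq = rest.filter (fun x => !decide (x < p)) := by
    rw [hgeq]; apply List.filter_congr; intro x _
    by_cases h : x < p
    · simp [h, not_le.mpr h]
    · simp [h, not_lt.mp h]
  apply PySem.List.sorted_id_eq_of_perm_of_pairwise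
  · refine List.Perm.trans ((PySem.List.sorted_perm less (fun x => x) false).append
      ((PySem.List.sorted_perm geq (fun x => x) false).cons p)) ?_
    refine List.Perm.trans List.perm_middle (List.Perm.cons p ?_)
    rw [hgeq']
    exact List.filter_append_perm _ rest
  · have hmL : ∀ a ∈ PySem.List.sorted less (fun x => x) false, a < p := by
      intro a ha
      have := (PySem.List.mem_sorted less (fun x => x) false a).mp ha
      rw [hless] at this
      simpa using (List.mem_filter.mp this).2
    have hmG : ∀ b ∈ PySem.List.sorted geq (fun x => x) false, p ≤ b := by
      intro b hb
      have := (PySem.List.mem_sorted geq (fun x => x) false b).mp hb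
      rw [hgeq] at this
      simpa using (List.mem_filter.mp this).2
    rw [List.pairwise_append]
    refine ⟨by simpa using PySem.List.sorted_pairwise less (fun x => x), ?_, ?_⟩
    · rw [List.pairwise_cons]
      exact ⟨hmG, by simpa using PySem.List.sorted_pairwise geq (fun x => x)⟩
    · intro a ha b hb
      rcases List.mem_cons.mp hb with rfl | hb'
      · exact le_of_lt (hmL a ha)
      · exact le_trans (le_of_lt (hmL a ha)) (hmG b hb')

-- B's quickselect sum equals the sum of the first k elements of sorted(xs)
lemma ksum_eq_aux (n : Nat) : ∀ (xs : List Int) (k : Int), xs.length ≤ n → 0 ≤ k → k ≤ xs.length →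
    pvKsum xs k = ((PySem.List.sorted xs (fun x => x) false).take k.toNat).sum := by
  induction n with
  | zero =>
    intro xs k hle hk0 hkn
    have hx : xs = [] := List.length_eq_zero_iff.mp (Nat.le_zero.mp hle)
    subst hx
    have : k = 0 := by simpa using le_antisymm (by simpa using hkn) hk0
    subst this
    simp [pvKsum]
  | succ n ih =>
    intro xs k hle hk0 hkn
    rw [pvKsum.eq_def]
    by_cases h0 : k = 0
    · simp [h0]
    · rw [if_neg h0]
      by_cases hfull : k = (xs.length : Int)
      · rw [if_pos hfull]
        have hkt : k.toNat = (PySem.List.sorted xs (fun x => x) false).length := by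
          rw [PySem.List.length_sorted]; omega
        rw [hkt, List.take_length]
        exact ((PySem.List.sorted_perm xs (fun x => x) false).sum_eq).symm
      · rw [if_neg hfull]
        cases xs with
        | nil => simp at hkn; omega
        | cons p rest =>
          simp only []
          set less := rest.filter (fun x => decide (x < p)) with hless
          set geq := rest.filter (fun x => decide (p ≤ x)) with hgeq
          have hlenL : less.length ≤ rest.length := List.length_filter_le _ rest
          have hlenG : geq.length ≤ rest.length := List.length_filter_le _ rest
          have hrest : rest.length ≤ n := by simpa using hle
          have hSL : (PySem.List.sorted less (fun x => x) false).length = less.length :=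
            PySem.List.length_sorted less (fun x => x) false
          rw [sorted_cons_partition p rest, ← hless, ← hgeq]
          by_cases hle2 : k ≤ (less.length : Int)
          · rw [if_pos hle2]
            rw [ih less k (le_trans hlenL hrest) hk0 hle2,
                List.take_append_of_le_length (by omega)]
          · rw [if_neg hle2]
            -- k exceeds the strictly-smaller part: p and a piece of geq are taken
            have hklt : k < ((p :: rest).length : Int) := by
              rcases lt_or_eq_of_le hkn with h | h
              · exact h
              · exact absurd h hfull
            have hkG : k - less.length - 1 ≤ (geq.length : Int) := by
              have hperm : (less ++ geq).Perm rest := by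
                have hgeq' : geq = rest.filter (fun x => !decide (x < p)) := by
                  rw [hgeq]; apply List.filter_congr; intro x _
                  by_cases h : x < p
                  · simp [h, not_le.mpr h]
                  · simp [h, not_lt.mp h]
                rw [hgeq']; exact List.filter_append_perm _ rest
              have hl2 := hperm.length_eq
              simp only [List.length_append] at hl2
              simp only [List.length_cons] at hklt
              push_cast at hklt ⊢
              omega
            rw [ih geq (k - less.length - 1) (le_trans hlenG hrest) (by omega) hkG]
            rw [List.take_append,
                List.take_of_length_le (l := PySem.List.sorted less (fun x => x) false)
                  (by rw [hSL]; omega)]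
            have hm : k.toNat - (PySem.List.sorted less (fun x => x) false).length
                = (k - less.length - 1).toNat + 1 := by
              rw [hSL]; omega
            rw [hm, List.take_succ_cons, List.sum_append, List.sum_cons,
                (PySem.List.sorted_perm less (fun x => x) false).sum_eq]
            ring

lemma ksum_eq (xs : List Int) (k : Int) (hk0 : 0 ≤ k) (hkn : k ≤ xs.length) :
    pvKsum xs k = ((PySem.List.sorted xs (fun x => x) false).take k.toNat).sum :=
  ksum_eq_aux xs.length xs k le_rfl hk0 hkn

-- ===== VERDICT (by name: the statement is the Claim_ definition above) =====
theorem absDifference_spec : Claim_equal_absDifference := by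
  intro nums k _ hpre
  obtain ⟨hk0, hkn⟩ := hpre
  unfold Spec_absDifference absDifference absDifference_alt
  simp only []
  set s := PySem.List.sorted nums (fun x => x) false with hs
  have hlen : s.length = nums.length := PySem.List.length_sorted nums (fun x => x) false
  have hkN : (k.toNat : Int) = k := Int.toNat_of_nonneg hk0
  have hkle : k.toNat ≤ s.length := by omega
  have hsum : s.sum = nums.sum := (PySem.List.sorted_perm nums (fun x => x) false).sum_eq
  rw [sorted_rev_eq_reverse nums, ← hs,
      PySem.List.foldl_prod_mk
        (f := fun acc i => acc + PySem.List.pyGetD s i 0)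
        (g := fun acc i => acc + PySem.List.pyGetD s.reverse i 0),
      ksum_eq nums k hk0 hkn, ksum_eq nums ((nums.length : Int) - k) (by omega) (by omega),
      ← hs, ← hkN, fold_sum s k.toNat 0 hkle,
      fold_sum s.reverse k.toNat 0 (by simpa using hkle), Int.toNat_natCast]
  have hmn : ((nums.length : Int) - (k.toNat : Int)).toNat = s.length - k.toNat := by omega
  rw [List.take_reverse, List.sum_reverse, hmn]
  have hsplit : (s.take (s.length - k.toNat)).sum + (s.drop (s.length - k.toNat)).sum = s.sum := by
    rw [← List.sum_append, List.take_append_drop]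
  have hdiff : nums.sum - (s.take (s.length - k.toNat)).sum = (s.drop (s.length - k.toNat)).sum := by
    omega
  rw [hdiff]
  simp
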